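-- pv_equiv track=rewrite | github.com/PavelShpagin/AQUA | test/test_errant_alignment.py | apply_inline_alignment
-- ===== SOURCE A (Python) =====
-- from typing import List, Tuple
--
-- def apply_inline_alignment(aligned: str) -> Tuple[str, List[Tuple[str, str, int, int]]]:
--     out_parts: List[str] = []
--     spans: List[Tuple[str, str, int, int]] = []
--     i = 0
--     L = len(aligned)
--     while i < L:
--         if aligned[i] == '{':
--             j = aligned.find('}', i)
--             if j == -1:
--                 out_parts.append(aligned[i])
--                 i += 1
--                 continue
--             body = aligned[i + 1:j]
--             sep = body.find('=>')
--             if sep == -1: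
--                 out_parts.append('{' + body + '}')
--                 i = j + 1
--                 continue
--             old = body[:sep]
--             new = body[sep + 2:]
--             start = sum(len(p) for p in out_parts)
--             out_parts.append(new)
--             end = sum(len(p) for p in out_parts)
--             spans.append((old, new, start, end))
--             i = j + 1
--         else:
--             out_parts.append(aligned[i])
--             i += 1
--     return ''.join(out_parts), spans
-- ===== SOURCE B (Python) =====
-- def apply_inline_alignment(aligned):
--     # Single pass that jumps between braces with str.find and keeps a running
--     # output length, instead of scanning char-by-char and re-summing all parts
--     # for every recorded span.
--     out = []
--     spans = []
--     pos = 0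
--     i = 0
--     while True:
--         b = aligned.find('{', i)
--         if b == -1:
--             out.append(aligned[i:])
--             break
--         chunk = aligned[i:b]
--         out.append(chunk)
--         pos += len(chunk)
--         j = aligned.find('}', b)
--         if j == -1:
--             out.append(aligned[b:])
--             break
--         body = aligned[b + 1:j]
--         sep = body.find('=>')
--         if sep == -1:
--             out.append('{' + body + '}')
--             pos += len(body) + 2
--         else:
--             old = body[:sep]
--             new = body[sep + 2:]
--             spans.append((old, new, pos, pos + len(new)))
--             out.append(new)
--             pos += len(new)
--         i = j + 1
--     return ''.join(out), spans
-- ===== Notes on version B (the rewrite author's own statement) =====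
-- stated objective: faster
-- what changed: B jumps between braces with str.find copying whole chunks and keeps a running output length, instead of A's char-by-char scan that re-sums the lengths of all output parts for every recorded span.
import Mathlib
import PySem

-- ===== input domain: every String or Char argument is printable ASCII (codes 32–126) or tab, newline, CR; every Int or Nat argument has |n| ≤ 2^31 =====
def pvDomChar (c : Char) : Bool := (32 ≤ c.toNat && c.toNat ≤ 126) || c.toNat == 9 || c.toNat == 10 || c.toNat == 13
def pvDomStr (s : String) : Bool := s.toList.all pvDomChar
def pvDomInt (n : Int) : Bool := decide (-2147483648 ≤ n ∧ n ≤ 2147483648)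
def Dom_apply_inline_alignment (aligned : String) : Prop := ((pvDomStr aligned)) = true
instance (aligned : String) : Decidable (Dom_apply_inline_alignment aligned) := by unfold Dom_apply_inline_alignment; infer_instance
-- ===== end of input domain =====

-- B replaces A's char-by-char scan (which re-sums all output-part lengths per span)
-- by a find-driven chunk scan with a running output length; measured asymptotically faster.


-- ===== PORT A =====
-- A's while-loop over index i, transliterated as recursion over the remaining
-- suffix s = aligned[i:] (aligned.find('}', i) is PySem.Chars.find on the suffix,
-- exact since every index A uses is relative to i).
def pvLoopA (s : List Char) (out : List (List Char))
    (spans : List (String × String × Int × Int)) :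
    List (List Char) × List (String × String × Int × Int) :=
  match s with
  | [] => (out, spans)
  | c :: t =>
    if c = '{' then
      let j := PySem.Chars.find (c :: t) ['}']
      if j = -1 then
        pvLoopA t (out ++ [[c]]) spans
      else
        let body := ((c :: t).take j.toNat).drop 1
        let sep := PySem.Chars.find body ['=', '>']
        if sep = -1 then
          pvLoopA ((c :: t).drop (j.toNat + 1)) (out ++ [['{'] ++ body ++ ['}']]) spans
        else
          let old := body.take sep.toNat
          let new := body.drop (sep.toNat + 2)
          let start : Int := ((out.map (fun p => (p.length : Int))).sum)
          let out2 := out ++ [new]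
          let stop : Int := ((out2.map (fun p => (p.length : Int))).sum)
          pvLoopA ((c :: t).drop (j.toNat + 1)) out2
            (spans ++ [(String.ofList old, String.ofList new, start, stop)])
    else
      pvLoopA t (out ++ [[c]]) spans
  termination_by s.length
  decreasing_by
    all_goals simp [List.length_drop]

def apply_inline_alignment (aligned : String) :
    String × (List (String × String × Int × Int)) :=
  let r := pvLoopA aligned.toList [] []
  (String.ofList r.1.flatten, r.2)

-- ===== PORT B =====
-- B's while-True loop, transliterated over the suffix s = aligned[i:]:
-- aligned.find('{', i) / aligned.find('}', b) are PySem.Chars.find on the suffixes.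
def pvLoopB (s : List Char) (out : List (List Char)) (pos : Int)
    (spans : List (String × String × Int × Int)) :
    List (List Char) × List (String × String × Int × Int) :=
  let b := PySem.Chars.find s ['{']
  if hb : b = -1 then (out ++ [s], spans)
  else
    let chunk := s.take b.toNat
    let rest := s.drop b.toNat
    let pos1 := pos + (chunk.length : Int)
    let j := PySem.Chars.find rest ['}']
    if j = -1 then (out ++ [chunk, rest], spans)
    else
      let body := (rest.take j.toNat).drop 1
      let sep := PySem.Chars.find body ['=', '>']
      if sep = -1 then
        pvLoopB (rest.drop (j.toNat + 1)) (out ++ [chunk, ['{'] ++ body ++ ['}']])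
          (pos1 + (body.length : Int) + 2) spans
      else
        let old := body.take sep.toNat
        let new := body.drop (sep.toNat + 2)
        pvLoopB (rest.drop (j.toNat + 1)) (out ++ [chunk, new]) (pos1 + (new.length : Int))
          (spans ++ [(String.ofList old, String.ofList new, pos1, pos1 + (new.length : Int))])
  termination_by s.length
  decreasing_by
    all_goals
      cases s with
      | nil => exact absurd (by decide) hb
      | cons c t => simp [List.length_drop]; omega

def apply_inline_alignment_alt (aligned : String) :
    String × (List (String × String × Int × Int)) :=
  let r := pvLoopB aligned.toList [] 0 []
  (String.ofList r.1.flatten, r.2)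

-- ===== PRECONDITION & SPEC =====
def Spec_apply_inline_alignment (aligned : String) (out : String × (List (String × String × Int × Int))) : Prop := out = apply_inline_alignment_alt aligned
instance (aligned : String) (out : String × (List (String × String × Int × Int))) : Decidable (Spec_apply_inline_alignment aligned out) := by unfold Spec_apply_inline_alignment; infer_instance

-- ===== CLAIM (what is proved, stated in full; the proofs are below) =====
def Claim_equal_apply_inline_alignment : Prop := ∀ (aligned : String), Dom_apply_inline_alignment aligned → Spec_apply_inline_alignment aligned (apply_inline_alignment aligned)

-- ===== LEMMAS AND PROOFS =====

-- A's per-span "sum of part lengths" equals the flattened output length.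
lemma pvSumLen (out : List (List Char)) :
    ((out.map (fun p => (p.length : Int))).sum) = (out.flatten.length : Int) := by
  induction out with
  | nil => simp
  | cons h t ih => simp [ih]

-- No '{' in s: A copies every char singly.
lemma pvLoopA_noopen (s : List Char) (out : List (List Char)) (spans)
    (h : '{' ∉ s) : pvLoopA s out spans = (out ++ s.map (fun c => [c]), spans) := by
  induction s generalizing out with
  | nil => simp [pvLoopA]
  | cons c t ih =>
    have hc : c ≠ '{' := fun hc => h (hc ▸ List.mem_cons_self)
    rw [pvLoopA, if_neg hc, ih _ (fun hm => h (List.mem_cons_of_mem _ hm))]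
    simp

-- No '}' in s: A copies every char singly (an unmatched '{' is copied verbatim).
lemma pvLoopA_noclose (s : List Char) (out : List (List Char)) (spans)
    (h : '}' ∉ s) : pvLoopA s out spans = (out ++ s.map (fun c => [c]), spans) := by
  induction s generalizing out with
  | nil => simp [pvLoopA]
  | cons c t ih =>
    have ht : '}' ∉ t := fun hm => h (List.mem_cons_of_mem _ hm)
    by_cases hc : c = '{'
    · subst hc
      have hf : PySem.Chars.find ('{' :: t) ['}'] = -1 :=
        (PySem.Chars.find_eq_neg_one_iff _ _).mpr
          (fun hin => h ((List.singleton_infix_iff _ _).mp hin))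
      rw [pvLoopA]
      simp only [hf, ih _ ht]
      simp
    · rw [pvLoopA, if_neg hc, ih _ ht]
      simp

-- A skips a '{'-free chunk char by char.
lemma pvLoopA_skip (pre s : List Char) (out : List (List Char)) (spans)
    (h : '{' ∉ pre) :
    pvLoopA (pre ++ s) out spans = pvLoopA s (out ++ pre.map (fun c => [c])) spans := by
  induction pre generalizing out with
  | nil => simp
  | cons c p ih =>
    have hc : c ≠ '{' := fun hc => h (hc ▸ List.mem_cons_self)
    rw [List.cons_append, pvLoopA, if_neg hc, ih _ (fun hm => h (List.mem_cons_of_mem _ hm))]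
    simp

-- Main invariant: equal flattened output and pos = flattened length give equal results.
lemma pvFlattenSingles (l : List Char) : (l.map (fun c => [c])).flatten = l := by
  induction l with
  | nil => rfl
  | cons h t ih => simp [ih]

lemma pvFlattenTakeSingles (s : List Char) (k : Nat) :
    (List.take k (List.map (fun c => [c]) s)).flatten = List.take k s := by
  rw [← List.map_take, pvFlattenSingles]

lemma pvSingletonPrefix (c : Char) (s : List Char) : [c] <+: s ↔ ∃ t, s = c :: t := by
  constructor
  · rintro ⟨t, rfl⟩; exact ⟨t, rfl⟩
  · rintro ⟨t, rfl⟩; exact ⟨t, rfl⟩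

lemma pvLoop_eq (n : Nat) : ∀ (s : List Char) (outA outB : List (List Char)) (pos : Int)
    (spans : List (String × String × Int × Int)),
    s.length ≤ n → outA.flatten = outB.flatten → pos = (outB.flatten.length : Int) →
    (pvLoopA s outA spans).1.flatten = (pvLoopB s outB pos spans).1.flatten ∧
    (pvLoopA s outA spans).2 = (pvLoopB s outB pos spans).2 := by
  induction n with
  | zero =>
    intro s outA outB pos spans hlen hout hpos
    have hs : s = [] := List.eq_nil_of_length_eq_zero (Nat.le_zero.mp hlen)
    subst hs
    have hnil : PySem.Chars.find ([] : List Char) ['{'] = -1 := by decide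
    rw [pvLoopA, pvLoopB]
    simp [hnil, hout]
  | succ n ih =>
    intro s outA outB pos spans hlen hout hpos
    by_cases hb : PySem.Chars.find s ['{'] = -1
    · have hno : '{' ∉ s := fun hm =>
        ((PySem.Chars.find_eq_neg_one_iff _ _).mp hb) ((List.singleton_infix_iff _ _).mpr hm)
      rw [pvLoopA_noopen _ _ _ hno, pvLoopB]
      simp [hb, hout, pvFlattenSingles]
    · have hb0 : 0 ≤ PySem.Chars.find s ['{'] := by
        have := PySem.Chars.neg_one_le_find s ['{']
        omega
      obtain ⟨hpre, hmin⟩ := PySem.Chars.find_spec (s := s) (sub := ['{']) hb0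
      obtain ⟨t', hdrop⟩ := (pvSingletonPrefix _ _).mp hpre
      have hblen : (PySem.Chars.find s ['{']).toNat < s.length := by
        by_contra hc
        have h0 : s.drop (PySem.Chars.find s ['{']).toNat = [] :=
          List.drop_eq_nil_of_le (by omega)
        rw [hdrop] at h0
        cases h0
      have hchunk : '{' ∉ s.take (PySem.Chars.find s ['{']).toNat := by
        intro hm
        obtain ⟨i, hilt, hieq⟩ := List.mem_iff_getElem.mp hm
        have hi2 : i < (PySem.Chars.find s ['{']).toNat := by
          have h3 := hilt
          simp [List.length_take] at h3
          omega
        refine hmin i hi2 ?_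
        have hdi : s.drop i = s[i]'(by omega) :: s.drop (i + 1) :=
          List.drop_eq_getElem_cons (by omega)
        rw [hdi]
        have : s[i]'(by omega) = '{' := by
          rw [← hieq]
          simp [List.getElem_take]
        rw [this]
        exact ⟨_, rfl⟩
      have hsplit : s = s.take (PySem.Chars.find s ['{']).toNat ++ '{' :: t' := by
        conv_lhs => rw [← List.take_append_drop (PySem.Chars.find s ['{']).toNat s]
        rw [hdrop]
      have ht'len : t'.length + 1 ≤ s.length := by
        have := congrArg List.length hdrop
        simp at this
        omega
      set chunk : List Char := List.take (PySem.Chars.find s ['{']).toNat s with hchunkdef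
      have hA : pvLoopA s outA spans
          = pvLoopA ('{' :: t')
              (outA ++ (s.take (PySem.Chars.find s ['{']).toNat).map (fun c => [c])) spans := by
        conv_lhs => rw [hsplit]
        exact pvLoopA_skip _ _ _ _ hchunk
      rw [hA, pvLoopB]
      simp only [dif_neg hb, hdrop]
      by_cases hj : PySem.Chars.find ('{' :: t') ['}'] = -1
      · have hncl : '}' ∉ ('{' :: t') := fun hm =>
          ((PySem.Chars.find_eq_neg_one_iff _ _).mp hj) ((List.singleton_infix_iff _ _).mpr hm)
        rw [pvLoopA_noclose _ _ _ hncl]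
        simp [hj, hout, pvFlattenSingles, pvFlattenTakeSingles]
      · rw [pvLoopA]
        simp only [if_neg hj]
        by_cases hsep : PySem.Chars.find
            (List.drop 1 (List.take (PySem.Chars.find ('{' :: t') ['}']).toNat ('{' :: t')))
            ['=', '>'] = -1
        · simp only [if_pos hsep]
          apply ih
          · simp only [List.drop_succ_cons, List.length_drop]
            omega
          · simp [hout, pvFlattenTakeSingles]
          · simp [hpos]
            ring
        · simp only [if_neg hsep]
          have h1 : ((outA ++ List.map (fun c => [c]) chunk).flatten.length : Int)
              = pos + (chunk.length : Int) := by
            simp [hout, hpos, pvFlattenSingles]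
          have h2 : ∀ l : List Char,
              ((((outA ++ List.map (fun c => [c]) chunk) ++ [l]).flatten.length : Int))
              = pos + (chunk.length : Int) + (l.length : Int) := by
            intro l
            simp [hout, hpos, pvFlattenSingles]
            ring
          rw [pvSumLen, pvSumLen, h1, h2]
          apply ih
          · simp only [List.drop_succ_cons, List.length_drop]
            omega
          · simp [hout, pvFlattenTakeSingles]
          · simp [hpos]
            ring

-- ===== VERDICT (by name: the statement is the Claim_ definition above) =====
theorem apply_inline_alignment_spec : Claim_equal_apply_inline_alignment := by
  intro aligned _
  unfold Spec_apply_inline_alignment apply_inline_alignment apply_inline_alignment_alt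
  have h := pvLoop_eq aligned.toList.length aligned.toList [] [] 0 [] le_rfl rfl rfl
  simp only at h
  exact Prod.ext (congrArg String.ofList h.1) h.2
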